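-- pv_equiv track=rewrite | github.com/nu-dialogue/UniPPN | system/e2e/pptod/pptod.py | belief_state_dict2str
-- ===== SOURCE A (Python) =====
-- from dataclasses import dataclass
-- from collections import defaultdict
--
-- @dataclass
-- class PPTODSpecialTokens:
--     context_sos: str = "<sos_context>"
--     context_eos: str = "<eos_context>"
--     belief_state_sos: str = "<sos_b>"
--     belief_state_eos: str = "<eos_b>"
--     db_result_sos: str = "<sos_db>"
--     db_result_eos: str = "<eos_db>"
--     user_utterance_sos: str = "<sos_u>"
--     user_utterance_eos: str = "<eos_u>"
--     system_response_sos: str = "<sos_r>"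
--     system_response_eos: str = "<eos_r>"
--
-- def belief_state_dict2str(belief_state: dict) -> str:
--     exclude_slots = ["booked"]
--     non_values = ["", "not mentioned"]
--     flat_bs = defaultdict(list)
--     for domain, domain_bs in belief_state.items():
--         for constraint_type, constraints in domain_bs.items():
--             for slot, value in constraints.items():
--                 if slot in exclude_slots:
--                     continue
--                 if value in non_values:
--                     continue
--                 flat_bs[domain].append([slot, value])
--
--     bs_strs = [PPTODSpecialTokens.belief_state_sos]
--     for domain, constraints in flat_bs.items():
--         bs_strs += [f"[{domain}]"]
--         for slot, value in constraints:
--             bs_strs += [f"{slot}={value}"]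
--     bs_strs += [PPTODSpecialTokens.belief_state_eos]
--
--     return ' '.join(bs_strs)
-- ===== SOURCE B (Python) =====
-- def belief_state_dict2str(belief_state: dict) -> str:
--     # Recursive direct string construction: no intermediate table, no parts
--     # list, no join -- each level emits its " "-prefixed fragment directly.
--     def slots(pairs):
--         if not pairs:
--             return ""
--         (slot, value) = pairs[0]
--         keep = slot != "booked" and value not in ("", "not mentioned")
--         return (f" {slot}={value}" if keep else "") + slots(pairs[1:])
--
--     def groups(cs):
--         if not cs:
--             return ""
--         return slots(list(cs[0][1].items())) + groups(cs[1:])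
--
--     def domains(ds):
--         if not ds:
--             return ""
--         (domain, domain_bs) = ds[0]
--         body = groups(list(domain_bs.items()))
--         return (f" [{domain}]" + body if body else "") + domains(ds[1:])
--
--     return "<sos_b>" + domains(list(belief_state.items())) + " <eos_b>"
-- ===== Notes on version B (the rewrite author's own statement) =====
-- stated objective: alternative
-- what changed: B replaces A's staged pipeline (flatten into a defaultdict table, then format the table into a token list, then ' '.join) by three nested recursive functions that build the final string directly by concatenating ' '-prefixed fragments, with no intermediate table, no parts list and no join.
import Mathlib
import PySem

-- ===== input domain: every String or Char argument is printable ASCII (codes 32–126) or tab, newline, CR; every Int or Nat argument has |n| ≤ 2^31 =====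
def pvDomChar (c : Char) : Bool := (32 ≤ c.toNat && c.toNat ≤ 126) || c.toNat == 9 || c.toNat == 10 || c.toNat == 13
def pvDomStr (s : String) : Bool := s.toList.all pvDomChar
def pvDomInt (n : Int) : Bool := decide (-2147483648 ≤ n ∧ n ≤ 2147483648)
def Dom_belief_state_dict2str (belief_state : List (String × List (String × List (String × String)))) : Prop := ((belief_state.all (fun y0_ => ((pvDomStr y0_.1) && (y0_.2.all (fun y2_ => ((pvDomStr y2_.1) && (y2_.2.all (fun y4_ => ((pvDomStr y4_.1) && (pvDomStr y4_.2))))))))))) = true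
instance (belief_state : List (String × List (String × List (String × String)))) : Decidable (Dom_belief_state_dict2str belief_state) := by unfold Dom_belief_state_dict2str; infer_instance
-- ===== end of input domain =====

-- B builds the string directly by nested recursion (no intermediate table, no parts list, no join); alternative decomposition, same cost.


-- ===== PORT A =====
def belief_state_dict2str (belief_state : List (String × List (String × List (String × String)))) : String :=
  let exclude_slots : List String := ["booked"]
  let non_values : List String := ["", "not mentioned"]
  let flat_bs : PySem.Dict String (List (String × String)) :=
    belief_state.foldl (fun fb dp =>
      dp.2.foldl (fun fb cp =>
        cp.2.foldl (fun fb sv =>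
          if sv.1 ∈ exclude_slots then fb
          else if sv.2 ∈ non_values then fb
          else fb.modify dp.1 [] (· ++ [(sv.1, sv.2)])) fb) fb) PySem.Dict.empty
  let bs_strs : List String :=
    flat_bs.items.foldl (fun acc p =>
      p.2.foldl (fun acc sv => acc ++ [sv.1 ++ "=" ++ sv.2]) (acc ++ ["[" ++ p.1 ++ "]"]))
      ["<sos_b>"]
  PySem.Str.join " " (bs_strs ++ ["<eos_b>"])

-- ===== PORT B =====
def altSlots : List (String × String) → String
  | [] => ""
  | sv :: rest =>
    (if sv.1 != "booked" && sv.2 != "" && sv.2 != "not mentioned"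
     then " " ++ sv.1 ++ "=" ++ sv.2 else "") ++ altSlots rest

def altCtypes : List (String × List (String × String)) → String
  | [] => ""
  | cp :: rest => altSlots cp.2 ++ altCtypes rest

def altDomains : List (String × List (String × List (String × String))) → String
  | [] => ""
  | dp :: rest =>
    (let body := altCtypes dp.2
     if body != "" then " [" ++ dp.1 ++ "]" ++ body else "") ++ altDomains rest

def belief_state_dict2str_alt (belief_state : List (String × List (String × List (String × String)))) : String :=
  "<sos_b>" ++ altDomains belief_state ++ " <eos_b>"

-- ===== PRECONDITION & SPEC =====
-- Pre_ excludes association lists with duplicate domain keys: a Python dict cannot carry two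
-- entries for one domain, so A never sees such an input (the dict collapses it before the call).
def Pre_belief_state_dict2str (belief_state : List (String × List (String × List (String × String)))) : Prop :=
  (belief_state.map Prod.fst).Nodup
instance (belief_state : List (String × List (String × List (String × String)))) : Decidable (Pre_belief_state_dict2str belief_state) := by unfold Pre_belief_state_dict2str; infer_instance
def pvWitness_belief_state_dict2str : (List (String × List (String × List (String × String)))) :=
  [("hotel", [("semi", [("area", "north"), ("booked", "yes"), ("stars", "")])]), ("taxi", [("semi", [("dest", "not mentioned")])])]

def Spec_belief_state_dict2str (belief_state : List (String × List (String × List (String × String)))) (out : String) : Prop := out = belief_state_dict2str_alt belief_state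
instance (belief_state : List (String × List (String × List (String × String)))) (out : String) : Decidable (Spec_belief_state_dict2str belief_state out) := by unfold Spec_belief_state_dict2str; infer_instance

-- ===== CLAIM (what is proved, stated in full; the proofs are below) =====
def Claim_equal_belief_state_dict2str : Prop := ∀ (belief_state : List (String × List (String × List (String × String)))), Dom_belief_state_dict2str belief_state → Pre_belief_state_dict2str belief_state → Spec_belief_state_dict2str belief_state (belief_state_dict2str belief_state)

-- ===== LEMMAS AND PROOFS =====

def pvKeep (sv : String × String) : Bool :=
  sv.1 != "booked" && sv.2 != "" && sv.2 != "not mentioned"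

def pvSurvivors (domain_bs : List (String × List (String × String))) : List (String × String) :=
  domain_bs.flatMap (fun cp => cp.2.filter pvKeep)

def pvItemsOf (bs : List (String × List (String × List (String × String)))) : List (String × List (String × String)) :=
  bs.filterMap (fun dp =>
    let s := pvSurvivors dp.2
    if s.isEmpty then none else some (dp.1, s))

def pvFmt (sv : String × String) : String := sv.1 ++ "=" ++ sv.2

-- L1
theorem pvL1 (l : List (String × String)) (k : String) (fb : PySem.Dict String (List (String × String))) :
    l.foldl (fun fb sv =>
      if sv.1 ∈ (["booked"] : List String) then fb
      else if sv.2 ∈ (["", "not mentioned"] : List String) then fb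
      else fb.modify k [] (· ++ [(sv.1, sv.2)])) fb
    = (l.filter pvKeep).foldl (fun fb sv => fb.modify k [] (· ++ [sv])) fb := by
  induction l generalizing fb with
  | nil => rfl
  | cons sv rest ih =>
    by_cases h : pvKeep sv = true
    · simp only [pvKeep, Bool.and_eq_true, bne_iff_ne, ne_eq] at h
      obtain ⟨⟨ha, hb⟩, hc⟩ := h
      have h1 : ¬ sv.1 ∈ (["booked"] : List String) := by simp [ha]
      have h2 : ¬ sv.2 ∈ (["", "not mentioned"] : List String) := by simp [hb, hc]
      have h : pvKeep sv = true := by simp [pvKeep, ha, hb, hc]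
      simp only [List.foldl_cons, List.filter_cons, h, if_pos, if_neg h1, if_neg h2]
      exact ih _
    · have : (if sv.1 ∈ (["booked"] : List String) then fb
        else if sv.2 ∈ (["", "not mentioned"] : List String) then fb
        else fb.modify k [] (· ++ [(sv.1, sv.2)])) = fb := by
        simp only [pvKeep, Bool.and_eq_true, bne_iff_ne, ne_eq, not_and, not_not] at h
        by_cases ha : sv.1 = "booked"
        · simp [ha]
        · by_cases hb : sv.2 = ""
          · simp [hb]
          · simp [h ⟨ha, hb⟩]
      simp only [List.foldl_cons, List.filter_cons, h, this]
      simpa using ih fb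

-- L2
theorem pvL2 (dbs : List (String × List (String × String))) (k : String)
    (fb : PySem.Dict String (List (String × String))) :
    dbs.foldl (fun fb cp =>
      cp.2.foldl (fun fb sv =>
        if sv.1 ∈ (["booked"] : List String) then fb
        else if sv.2 ∈ (["", "not mentioned"] : List String) then fb
        else fb.modify k [] (· ++ [(sv.1, sv.2)])) fb) fb
    = (pvSurvivors dbs).foldl (fun fb sv => fb.modify k [] (· ++ [sv])) fb := by
  induction dbs generalizing fb with
  | nil => rfl
  | cons cp rest ih =>
    simp only [List.foldl_cons, pvSurvivors, List.flatMap_cons, List.foldl_append]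
    rw [pvL1]
    exact ih _

-- L3
theorem pvL3 (L : List (String × String)) (k : String)
    (pre : List (String × List (String × String))) (v : List (String × String))
    (h : ∀ p ∈ pre, (p.1 == k) = false) :
    L.foldl (fun fb sv => fb.modify k [] (· ++ [sv])) (PySem.Dict.mk (pre ++ [(k, v)]))
    = PySem.Dict.mk (pre ++ [(k, v ++ L)]) := by
  induction L generalizing v with
  | nil => simp
  | cons sv rest ih =>
    have hc : (PySem.Dict.mk (pre ++ [(k, v)])).contains k = true := by
      simp [PySem.Dict.contains]
    have hg : (PySem.Dict.mk (pre ++ [(k, v)])).getD k [] = v := by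
      simp [PySem.Dict.getD, PySem.Dict.get?, List.find?_append]
      rw [List.find?_eq_none.mpr]
      · simp
      · intro p hp; simp [h p hp]
    have hstep : (PySem.Dict.mk (pre ++ [(k, v)])).modify k [] (· ++ [sv])
        = PySem.Dict.mk (pre ++ [(k, v ++ [sv])]) := by
      simp only [PySem.Dict.modify, hg, PySem.Dict.insert, hc, if_pos]
      congr 1
      simp only [List.map_append]
      congr 1
      · rw [List.map_congr_left (fun p hp => ?_), List.map_id]
        simp [h p hp]
      · simp
    rw [List.foldl_cons, hstep, ih (v ++ [sv])]
    simp

-- L4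
theorem pvL4 (L : List (String × String)) (k : String)
    (pre : List (String × List (String × String)))
    (h : ∀ p ∈ pre, (p.1 == k) = false) :
    L.foldl (fun fb sv => fb.modify k [] (· ++ [sv])) (PySem.Dict.mk pre)
    = if L.isEmpty then PySem.Dict.mk pre else PySem.Dict.mk (pre ++ [(k, L)]) := by
  cases L with
  | nil => rfl
  | cons sv rest =>
    have hc : (PySem.Dict.mk pre).contains k = false := by
      simp only [PySem.Dict.contains, List.any_eq_false]
      intro p hp; simp [h p hp]
    have hg : (PySem.Dict.mk pre).getD k [] = [] := by
      simp [PySem.Dict.getD, PySem.Dict.get?]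
      rw [List.find?_eq_none.mpr]
      · simp
      · intro p hp; simp [h p hp]
    have hstep : (PySem.Dict.mk pre).modify k [] (· ++ [sv]) = PySem.Dict.mk (pre ++ [(k, [sv])]) := by
      simp [PySem.Dict.modify, hg, PySem.Dict.insert, hc]
    rw [List.foldl_cons, hstep, pvL3 rest k pre [sv] h]
    simp

theorem pvItemsOf_cons (dp : String × List (String × List (String × String)))
    (rest : List (String × List (String × List (String × String)))) :
    pvItemsOf (dp :: rest)
    = if (pvSurvivors dp.2).isEmpty then pvItemsOf rest
      else (dp.1, pvSurvivors dp.2) :: pvItemsOf rest := by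
  simp only [pvItemsOf, List.filterMap_cons]
  by_cases he : (pvSurvivors dp.2).isEmpty = true
  · simp [he]
  · simp [he]

-- L5
theorem pvL5 (bs : List (String × List (String × List (String × String))))
    (pre : List (String × List (String × String)))
    (h : ∀ dp ∈ bs, ∀ p ∈ pre, (p.1 == dp.1) = false)
    (hnd : (bs.map Prod.fst).Nodup) :
    bs.foldl (fun fb dp =>
      (pvSurvivors dp.2).foldl (fun fb sv => fb.modify dp.1 [] (· ++ [sv])) fb)
      (PySem.Dict.mk pre)
    = PySem.Dict.mk (pre ++ pvItemsOf bs) := by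
  induction bs generalizing pre with
  | nil => simp [pvItemsOf]
  | cons dp rest ih =>
    simp only [List.map_cons, List.nodup_cons] at hnd
    rw [List.foldl_cons, pvL4 _ _ _ (h dp (by simp))]
    by_cases he : (pvSurvivors dp.2).isEmpty = true
    · rw [if_pos he, ih pre (fun q hq p hp => h q (by simp [hq]) p hp) hnd.2]
      rw [pvItemsOf_cons, if_pos he]
    · rw [if_neg he]
      rw [ih (pre ++ [(dp.1, pvSurvivors dp.2)]) ?_ hnd.2]
      · rw [pvItemsOf_cons, if_neg he]
        simp
      · intro q hq p hp
        rcases List.mem_append.mp hp with hp | hp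
        · exact h q (by simp [hq]) p hp
        · simp only [List.mem_singleton] at hp
          subst hp
          simp only [beq_eq_false_iff_ne, ne_eq]
          intro hcontra
          exact hnd.1 (hcontra ▸ List.mem_map_of_mem hq)

-- character-level fragment of one slot list
def pvFrag (L : List (String × String)) : List Char :=
  L.flatMap (fun sv => ' ' :: (pvFmt sv).toList)

-- join with " " of a nonempty list, at the character level
theorem pvFrag_append (a b : List (String × String)) : pvFrag (a ++ b) = pvFrag a ++ pvFrag b := by
  simp [pvFrag]

theorem pvJoin_chars (x : String) (L : List String) :
    (PySem.Str.join " " (x :: L)).toList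
    = x.toList ++ L.flatMap (fun s => ' ' :: s.toList) := by
  induction L generalizing x with
  | nil => simp [PySem.Str.toList_join, PySem.Chars.join_singleton]
  | cons y rest ih =>
    have hy := ih y
    rw [PySem.Str.toList_join, List.map_cons] at hy
    rw [PySem.Str.toList_join, List.map_cons, List.map_cons, PySem.Chars.join_cons_cons, hy]
    simp [List.flatMap_cons]

theorem pvAltSlots_chars (l : List (String × String)) :
    (altSlots l).toList = pvFrag (l.filter pvKeep) := by
  induction l with
  | nil => simp [altSlots, pvFrag]
  | cons sv rest ih =>
    simp only [altSlots, List.filter_cons]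
    by_cases h : pvKeep sv = true
    · have h' : (sv.1 != "booked" && sv.2 != "" && sv.2 != "not mentioned") = true := h
      simp [h', h, pvFrag, ih, pvFmt]
    · have h' : (sv.1 != "booked" && sv.2 != "" && sv.2 != "not mentioned") = false := by
        simpa [pvKeep] using h
      simp [h', h, ih]

theorem pvAltCtypes_chars (dbs : List (String × List (String × String))) :
    (altCtypes dbs).toList = pvFrag (pvSurvivors dbs) := by
  induction dbs with
  | nil => simp [altCtypes, pvSurvivors, pvFrag]
  | cons cp rest ih =>
    rw [show altCtypes (cp :: rest) = altSlots cp.2 ++ altCtypes rest from rfl,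
        String.toList_append, pvAltSlots_chars, ih,
        show pvSurvivors (cp :: rest) = cp.2.filter pvKeep ++ pvSurvivors rest by
          simp [pvSurvivors],
        pvFrag_append]

theorem pvFrag_nil_iff (L : List (String × String)) : pvFrag L = [] ↔ L = [] := by
  cases L <;> simp [pvFrag]

theorem pvAltCtypes_empty_iff (dbs : List (String × List (String × String))) :
    (altCtypes dbs != "") = !(pvSurvivors dbs).isEmpty := by
  by_cases he : pvSurvivors dbs = []
  · have h0 : altCtypes dbs = "" := by
      apply String.toList_injective
      rw [pvAltCtypes_chars, he]
      simp [pvFrag]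
    rw [h0, he]
    rfl
  · have hne : altCtypes dbs ≠ "" := by
      intro hc
      apply he
      have h := pvAltCtypes_chars dbs
      rw [hc] at h
      exact (pvFrag_nil_iff _).mp (by simpa using h.symm)
    have h2 : (pvSurvivors dbs).isEmpty = false := by simp [he]
    simp [hne, h2]

theorem pvAltDomains_chars (bs : List (String × List (String × List (String × String)))) :
    (altDomains bs).toList
    = (pvItemsOf bs).flatMap (fun p =>
        ' ' :: ("[" ++ p.1 ++ "]").toList ++ pvFrag p.2) := by
  induction bs with
  | nil => simp [altDomains, pvItemsOf]
  | cons dp rest ih =>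
    rw [pvItemsOf_cons]
    by_cases he : (pvSurvivors dp.2).isEmpty = true
    · have hb : (altCtypes dp.2 != "") = false := by
        rw [pvAltCtypes_empty_iff, he]; rfl
      simp only [altDomains, hb, Bool.false_eq_true, if_false, if_pos he]
      simpa using ih
    · have he' : (pvSurvivors dp.2).isEmpty = false := by simpa using he
      have hb : (altCtypes dp.2 != "") = true := by
        rw [pvAltCtypes_empty_iff, he']; rfl
      simp only [altDomains, hb, if_true, if_neg he, List.flatMap_cons]
      simp [pvAltCtypes_chars, ih]

-- A's flattened token list, space-prefixed, equals B's domain fragments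
theorem pvFlat (items : List (String × List (String × String))) :
    (items.flatMap (fun p => ("[" ++ p.1 ++ "]") :: p.2.map pvFmt)).flatMap
      (fun s => ' ' :: s.toList)
    = items.flatMap (fun p => ' ' :: ("[" ++ p.1 ++ "]").toList ++ pvFrag p.2) := by
  induction items with
  | nil => rfl
  | cons p rest ih =>
    simp [List.flatMap_cons, List.flatMap_append, ih, pvFrag, List.flatMap_map]

theorem pv_main (bs : List (String × List (String × List (String × String))))
    (hnd : (bs.map Prod.fst).Nodup) :
    belief_state_dict2str bs = belief_state_dict2str_alt bs := by
  unfold belief_state_dict2str belief_state_dict2str_alt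
  simp only [pvL2]
  have hflat : bs.foldl (fun fb dp =>
      (pvSurvivors dp.2).foldl (fun fb sv => fb.modify dp.1 [] (· ++ [sv])) fb)
      PySem.Dict.empty = PySem.Dict.mk (pvItemsOf bs) := by
    have := pvL5 bs [] (by simp) hnd
    simpa [PySem.Dict.empty] using this
  rw [hflat]
  have hitems : (PySem.Dict.mk (pvItemsOf bs)).items = pvItemsOf bs := rfl
  rw [hitems]
  simp only [PySem.List.foldl_append_singleton_eq_map]
  -- A's token list = "<sos_b>" :: flatMap of per-domain headers + formatted slots
  have hparts : (pvItemsOf bs).foldl (fun acc p =>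
        (acc ++ ["[" ++ p.1 ++ "]"]) ++ p.2.map (fun sv => sv.1 ++ "=" ++ sv.2)) ["<sos_b>"]
      = "<sos_b>" :: (pvItemsOf bs).flatMap (fun p => ("[" ++ p.1 ++ "]") :: p.2.map pvFmt) := by
    generalize pvItemsOf bs = items
    induction items using List.reverseRecOn with
    | nil => simp
    | append_singleton init p ih =>
      rw [List.foldl_append, ih]
      simp [pvFmt, List.flatMap_append]
  rw [hparts]
  apply String.toList_injective
  rw [show ("<sos_b>" :: (pvItemsOf bs).flatMap (fun p => ("[" ++ p.1 ++ "]") :: p.2.map pvFmt)) ++ ["<eos_b>"]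
      = "<sos_b>" :: ((pvItemsOf bs).flatMap (fun p => ("[" ++ p.1 ++ "]") :: p.2.map pvFmt) ++ ["<eos_b>"]) from rfl]
  rw [pvJoin_chars]
  simp only [String.toList_append, pvAltDomains_chars, List.flatMap_append, List.flatMap_cons,
    List.flatMap_nil, List.append_nil, pvFlat]
  have heos : (" <eos_b>").toList = ' ' :: "<eos_b>".toList := rfl
  simp [heos]

-- ===== VERDICT (by name: the statement is the Claim_ definition above) =====
theorem belief_state_dict2str_spec : Claim_equal_belief_state_dict2str := by
  intro bs _ hpre
  exact pv_main bs hpre
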